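-- pv_equiv track=rewrite | github.com/miliar/Code_Jam_Webscraper | solutions_python/solutions_year16_round0_nr3/2455.py | getPossibleCoins
-- ===== SOURCE A (Python) =====
-- def getPossibleCoins(length):
-- 	coinList = []
-- 	coin = '1'
-- 	coinList.append(coin)
-- 	for i in range(length-2):
-- 		newList = []
-- 		for c in coinList:
-- 			newList.append(c + '0')
-- 			newList.append(c + '1')
-- 		coinList = newList
-- 	coinList = [x + '1' for x in coinList]
-- 	return coinList
-- ===== SOURCE B (Python) =====
-- def getPossibleCoins(length):
--     n = max(length - 2, 0)
--     top = 2 ** n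
--     return ['1' + format(top + i, 'b')[1:] + '1' for i in range(top)]
-- ===== Notes on version B (the rewrite author's own statement) =====
-- stated objective: alternative
-- what changed: A grows the list of middle bit-strings by repeated doubling passes (append '0'/'1' to every prefix, length-2 times); B computes each string directly from its integer index i in range(2**max(length-2,0)), taking the binary digits of 2**n + i with the leading 1 dropped, which reproduces A's counting order exactly.
import Mathlib
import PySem

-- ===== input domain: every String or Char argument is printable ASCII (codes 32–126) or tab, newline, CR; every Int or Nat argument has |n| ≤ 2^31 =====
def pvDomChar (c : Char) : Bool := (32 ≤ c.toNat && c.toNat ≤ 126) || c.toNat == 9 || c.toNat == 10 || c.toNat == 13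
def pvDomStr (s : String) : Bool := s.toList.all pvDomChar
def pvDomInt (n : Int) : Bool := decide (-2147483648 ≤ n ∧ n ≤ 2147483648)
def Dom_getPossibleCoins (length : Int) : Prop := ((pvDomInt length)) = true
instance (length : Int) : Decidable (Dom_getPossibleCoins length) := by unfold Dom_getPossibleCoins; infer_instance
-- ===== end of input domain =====

-- B replaces A's repeated list-doubling by computing each string directly from the binary
-- digits of its integer index (objective: alternative; same values, different algorithm).

-- ===== PORT A =====
def getPossibleCoins (length : Int) : List String :=
  ((PySem.List.pyRange 0 (length - 2) 1).foldl
      (fun coinList _ =>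
        coinList.foldl (fun newList c => newList ++ [c ++ "0", c ++ "1"]) [])
      ["1"]).map (fun x => x ++ "1")

-- ===== PORT B =====
-- hand port of Python's format(m, 'b') (no PySem primitive): binary digits, MSB first.
-- Structural recursion on a fuel bound (= m itself); exact for m ≥ 1 — B only calls it
-- with m = top + i ≥ 1 (format(0,'b') = "0" is never reached).
def pvBinAux : Nat → Nat → List Char
  | 0, _ => []
  | fuel + 1, m =>
    if m = 0 then [] else pvBinAux fuel (m / 2) ++ [if m % 2 = 1 then '1' else '0']

def pvFormatBin (m : Int) : String := String.ofList (pvBinAux m.toNat m.toNat)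

-- exponent: max (length-2) 0 ≥ 0, so `.toNat` is exact for Python's `**`
def getPossibleCoins_alt (length : Int) : List String :=
  (PySem.List.pyRange 0 ((2 : Int) ^ (max (length - 2) 0).toNat) 1).map (fun i =>
    "1" ++
      PySem.Str.slice (pvFormatBin ((2 : Int) ^ (max (length - 2) 0).toNat + i)) (some 1) none
      ++ "1")

-- ===== PRECONDITION & SPEC =====
def Spec_getPossibleCoins (length : Int) (out : List String) : Prop := out = getPossibleCoins_alt length
instance (length : Int) (out : List String) : Decidable (Spec_getPossibleCoins length out) := by unfold Spec_getPossibleCoins; infer_instance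

-- ===== CLAIM (what is proved, stated in full; the proofs are below) =====
def Claim_equal_getPossibleCoins : Prop := ∀ (length : Int), Dom_getPossibleCoins length → Spec_getPossibleCoins length (getPossibleCoins length)

-- ===== LEMMAS AND PROOFS =====

-- one doubling pass of A's loop
def pvStep (l : List String) : List String :=
  l.foldl (fun newList c => newList ++ [c ++ "0", c ++ "1"]) []

-- the n binary digits of i, most significant first
def pvBits : Nat → Nat → List Char
  | 0, _ => []
  | n + 1, i => pvBits n (i / 2) ++ [if i % 2 = 1 then '1' else '0']

theorem pvStep_eq_flatMap (l : List String) :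
    pvStep l = l.flatMap (fun c => [c ++ "0", c ++ "1"]) := by
  simpa [pvStep] using PySem.List.foldl_append_eq_flatMap (fun c => [c ++ "0", c ++ "1"]) l []

theorem pvFoldl_const {α : Type} (r : List Int) (init : α) (f : α → α) :
    r.foldl (fun a _ => f a) init = f^[r.length] init := by
  induction r generalizing init with
  | nil => rfl
  | cons x xs ih => simp [List.foldl_cons, ih, Function.iterate_succ_apply]

theorem pvRange_two_mul (m : Nat) :
    List.range (2 * m) = (List.range m).flatMap (fun j => [2 * j, 2 * j + 1]) := by
  induction m with
  | zero => rfl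
  | succ m ih =>
    have h : 2 * (m + 1) = (2 * m + 1) + 1 := by omega
    rw [h, List.range_succ, List.range_succ, ih, List.range_succ]
    simp

theorem pvStep_iterate (n : Nat) :
    pvStep^[n] ["1"] =
      (List.range (2 ^ n)).map (fun i => String.ofList ('1' :: pvBits n i)) := by
  induction n with
  | zero => rfl
  | succ n ih =>
    rw [Function.iterate_succ_apply', ih, pvStep_eq_flatMap]
    have h2 : 2 ^ (n + 1) = 2 * 2 ^ n := by ring
    rw [h2, pvRange_two_mul, List.flatMap_map, List.map_flatMap]
    congr 1
    funext j
    have hd0 : (2 * j) / 2 = j := by omega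
    have hm0 : (2 * j) % 2 = 0 := by omega
    have hd1 : (2 * j + 1) / 2 = j := by omega
    have hm1 : (2 * j + 1) % 2 = 1 := by omega
    simp only [pvBits, hd0, hm0, hd1, hm1, List.map_cons, List.map_nil]
    norm_num
    constructor <;>
      (apply String.toList_inj.mp
       simp [show ("0" : String).toList = ['0'] from rfl,
         show ("1" : String).toList = ['1'] from rfl])

-- A as a closed map over the index range
theorem pvA_char (length : Int) :
    getPossibleCoins length =
      (List.range (2 ^ (length - 2).toNat)).map
        (fun i => String.ofList ('1' :: (pvBits (length - 2).toNat i ++ ['1']))) := by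
  unfold getPossibleCoins
  have hbody :
      (fun (coinList : List String) (_ : Int) =>
        coinList.foldl (fun newList c => newList ++ [c ++ "0", c ++ "1"]) [])
      = fun coinList _ => pvStep coinList := rfl
  rw [hbody]
  have hfold :
      (PySem.List.pyRange 0 (length - 2) 1).foldl (fun coinList _ => pvStep coinList) ["1"]
      = pvStep^[(length - 2).toNat] ["1"] := by
    rcases le_or_gt (length - 2) 0 with h | h
    · have hr : PySem.List.pyRange 0 (length - 2) 1 = [] := by
        simp [PySem.List.pyRange]; omega
      have hn : (length - 2).toNat = 0 := by omega
      rw [hr, hn]; rfl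
    · obtain ⟨n, hn⟩ : ∃ n : Nat, length - 2 = (n : Int) := ⟨(length - 2).toNat, by omega⟩
      rw [hn, PySem.List.pyRange_zero_natCast, pvFoldl_const _ _ pvStep]
      simp
  rw [hfold, pvStep_iterate, List.map_map]
  apply List.map_congr_left
  intro i _
  apply String.toList_inj.mp
  simp [Function.comp, show ("1" : String).toList = ['1'] from rfl]

theorem pvBinAux_zero (fuel : Nat) : pvBinAux fuel 0 = [] := by
  cases fuel <;> rfl

theorem pvBinAux_pow_add (n : Nat) :
    ∀ (i fuel : Nat), i < 2 ^ n → 2 ^ n + i ≤ fuel →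
      pvBinAux fuel (2 ^ n + i) = '1' :: pvBits n i := by
  induction n with
  | zero =>
    intro i fuel hi hf
    interval_cases i
    obtain ⟨f, rfl⟩ : ∃ f, fuel = f + 1 := ⟨fuel - 1, by omega⟩
    simp [pvBinAux, pvBinAux_zero, pvBits]
  | succ n ih =>
    intro i fuel hi hf
    obtain ⟨f, rfl⟩ : ∃ f, fuel = f + 1 := ⟨fuel - 1, by omega⟩
    have hne : 2 ^ (n + 1) + i ≠ 0 := by positivity
    have hdiv : (2 ^ (n + 1) + i) / 2 = 2 ^ n + i / 2 := by omega
    have hmod : (2 ^ (n + 1) + i) % 2 = i % 2 := by omega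
    rw [pvBinAux, if_neg hne, hdiv, hmod,
      ih (i / 2) f (by omega) (by omega), pvBits]
    rfl

-- B as the same closed map
theorem pvB_char (length : Int) :
    getPossibleCoins_alt length =
      (List.range (2 ^ (length - 2).toNat)).map
        (fun i => String.ofList ('1' :: (pvBits (length - 2).toNat i ++ ['1']))) := by
  unfold getPossibleCoins_alt
  have hmax : max (length - 2) 0 = (((length - 2).toNat : Nat) : Int) := by omega
  rw [hmax]
  have hpow : ((2 : Int) ^ ((((length - 2).toNat : Nat) : Int)).toNat)
      = ((2 ^ (length - 2).toNat : Nat) : Int) := by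
    rw [Int.toNat_natCast]; push_cast; ring
  rw [hpow, PySem.List.pyRange_zero_natCast, List.map_map]
  apply List.map_congr_left
  intro j hmem
  have hj : j < 2 ^ (length - 2).toNat := List.mem_range.mp hmem
  simp only [Function.comp_apply]
  have ht : ((((2 ^ (length - 2).toNat : Nat) : Int)) + (j : Nat)).toNat
      = 2 ^ (length - 2).toNat + j := by omega
  rw [pvFormatBin, ht, pvBinAux_pow_add _ j _ hj (le_refl _)]
  apply String.toList_inj.mp
  simp only [String.toList_append, PySem.Str.toList_slice, PySem.Chars.slice_eq_listSlice]
  rw [PySem.List.slice_from _ (by norm_num : (0 : Int) ≤ 1)]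
  simp [show ("1" : String).toList = ['1'] from rfl]

-- ===== VERDICT (by name: the statement is the Claim_ definition above) =====
theorem getPossibleCoins_spec : Claim_equal_getPossibleCoins := by
  intro length _
  unfold Spec_getPossibleCoins
  rw [pvA_char, pvB_char]
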